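-- pv_equiv track=rewrite | github.com/schongallam/TAF-App | tafs.py | add_METARs_to_TAFs
-- ===== SOURCE A (Python) =====
-- def all_METARs_from_station(METARs, station, max=24):
--     lines = []
--     count = 0
--     for METAR in METARs:
--         if count >= max: break
--         if METAR[0:4] == station:
--             lines.append(METAR)
--             count += 1
--     if lines != []:
--         lines.append("")
--     return lines
--
-- def get_TAF_from_station(TAFs, station):
--     offset = 0 # the reason to use an offset is to preserve the original leading characters in order to
--     # be true to the original data as much as possible. Some countries start TAFs with "TAF" instead of the station ICAO.
--     for i in range(len(TAFs)):
--         if TAFs[i][0:4] == "TAF ":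
--             offset=4
--         if TAFs[i][0+offset:4+offset] == station:
--             return TAFs[i]
--     return station + " TAF not found" # shouldn't have to resort to this if we did everything else correctly
--
-- def add_METARs_to_TAFs(TAFs, TAF_stations, METARs, max_metars=24):
--     lines = []
--     TAFs.sort()
--     TAF_stations.sort()
--     METARs.sort()
--     for station in TAF_stations:
--         lines = lines + all_METARs_from_station(METARs, station, max_metars) + [get_TAF_from_station(TAFs, station), ""]
--     return lines
-- ===== SOURCE B (Python) =====
-- # Single-pass indexing: one dict station->METAR group (capped) and one dict station->first TAF
-- # (with the running "TAF " offset precomputed), then one pass over the stations.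
-- # Like A, this sorts the three argument lists in place.
-- def add_METARs_to_TAFs(TAFs, TAF_stations, METARs, max_metars=24):
--     TAFs.sort()
--     TAF_stations.sort()
--     METARs.sort()
--     taf_by_station = {}
--     offset = 0
--     for t in TAFs:
--         if t[0:4] == "TAF ":
--             offset = 4
--         k = t[offset:offset + 4]
--         if k not in taf_by_station:
--             taf_by_station[k] = t
--     metars_by_station = {}
--     if max_metars > 0:
--         for m in METARs:
--             k = m[0:4]
--             lst = metars_by_station.get(k)
--             if lst is None:
--                 metars_by_station[k] = [m]
--             elif len(lst) < max_metars:
--                 lst.append(m)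
--     lines = []
--     for station in TAF_stations:
--         ms = metars_by_station.get(station, [])
--         if ms:
--             lines += ms + [""]
--         lines.append(taf_by_station.get(station, station + " TAF not found"))
--         lines.append("")
--     return lines
-- ===== Notes on version B (the rewrite author's own statement) =====
-- stated objective: faster
-- what changed: Replaces the per-station rescans of METARs and TAFs by two dicts built in one pass each (station->capped METAR group, station->first TAF with the running 'TAF ' offset precomputed), then one pass over the stations; like A it sorts the argument lists in place.
import Mathlib
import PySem

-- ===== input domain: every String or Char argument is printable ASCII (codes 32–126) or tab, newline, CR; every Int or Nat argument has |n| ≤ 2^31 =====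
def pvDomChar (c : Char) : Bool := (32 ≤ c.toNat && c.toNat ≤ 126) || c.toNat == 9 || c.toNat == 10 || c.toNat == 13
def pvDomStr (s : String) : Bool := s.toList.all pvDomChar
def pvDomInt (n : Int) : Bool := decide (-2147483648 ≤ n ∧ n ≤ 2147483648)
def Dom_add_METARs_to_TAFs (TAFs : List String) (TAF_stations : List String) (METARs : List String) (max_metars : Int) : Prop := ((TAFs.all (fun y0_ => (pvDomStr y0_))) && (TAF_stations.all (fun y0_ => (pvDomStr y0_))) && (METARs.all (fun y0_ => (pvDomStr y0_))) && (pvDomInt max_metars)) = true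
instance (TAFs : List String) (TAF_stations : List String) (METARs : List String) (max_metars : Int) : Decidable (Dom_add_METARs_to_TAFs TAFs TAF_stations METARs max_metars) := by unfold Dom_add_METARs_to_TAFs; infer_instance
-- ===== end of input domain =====

-- B replaces A's per-station rescans by two single-pass dict indexes (faster; timing-check measured);
-- like A, B sorts its list arguments in place (the theorems here are about the return value).


-- ===== PORT A =====
-- loop of all_METARs_from_station: state (lines, count); 'break' = returning lines
def all_METARs_from_station_go (station : String) (maxM : Int) : List String → List String → Int → List String
  | [], lines, _ => lines
  | METAR :: rest, lines, count =>
    if count ≥ maxM then lines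
    else if PySem.Str.slice METAR (some 0) (some 4) = station then
      all_METARs_from_station_go station maxM rest (lines ++ [METAR]) (count + 1)
    else all_METARs_from_station_go station maxM rest lines count

def all_METARs_from_station (METARs : List String) (station : String) (maxM : Int) : List String :=
  let lines := all_METARs_from_station_go station maxM METARs [] 0
  if lines ≠ [] then lines ++ [""] else lines

-- loop of get_TAF_from_station over range(len(TAFs)), carrying the running offset; early return on a match
def get_TAF_from_station_go (station : String) : List String → Int → String
  | [], _ => station ++ " TAF not found"
  | t :: rest, offset =>
    let offset' := if PySem.Str.slice t (some 0) (some 4) = "TAF " then 4 else offset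
    if PySem.Str.slice t (some (0 + offset')) (some (4 + offset')) = station then t
    else get_TAF_from_station_go station rest offset'

def get_TAF_from_station (TAFs : List String) (station : String) : String :=
  get_TAF_from_station_go station TAFs 0

def add_METARs_to_TAFs (TAFs : List String) (TAF_stations : List String) (METARs : List String) (max_metars : Int) : List String :=
  let TAFs := PySem.List.sorted TAFs (fun x => x) false
  let TAF_stations := PySem.List.sorted TAF_stations (fun x => x) false
  let METARs := PySem.List.sorted METARs (fun x => x) false
  TAF_stations.foldl (fun lines station =>
    lines ++ all_METARs_from_station METARs station max_metars ++ [get_TAF_from_station TAFs station, ""]) []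

-- ===== PORT B =====
-- one pass over TAFs: station -> first TAF line, keys read at the running offset
def pv_taf_index : List String → Int → PySem.Dict String String → PySem.Dict String String
  | [], _, d => d
  | t :: rest, offset, d =>
    let offset' := if PySem.Str.slice t (some 0) (some 4) = "TAF " then 4 else offset
    let k := PySem.Str.slice t (some offset') (some (offset' + 4))
    pv_taf_index rest offset' (if (d.get? k).isNone then d.insert k t else d)

-- one pass over METARs: station -> its METARs, capped at maxM
def pv_metar_index (maxM : Int) : List String → PySem.Dict String (List String) → PySem.Dict String (List String)
  | [], d => d
  | m :: rest, d =>
    let k := PySem.Str.slice m (some 0) (some 4)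
    let d' := match d.get? k with
      | none => d.insert k [m]
      | some lst => if (lst.length : Int) < maxM then d.insert k (lst ++ [m]) else d
    pv_metar_index maxM rest d'

def add_METARs_to_TAFs_alt (TAFs : List String) (TAF_stations : List String) (METARs : List String) (max_metars : Int) : List String :=
  let TAFs := PySem.List.sorted TAFs (fun x => x) false
  let TAF_stations := PySem.List.sorted TAF_stations (fun x => x) false
  let METARs := PySem.List.sorted METARs (fun x => x) false
  let tafIdx := pv_taf_index TAFs 0 PySem.Dict.empty
  let metarIdx := if 0 < max_metars then pv_metar_index max_metars METARs PySem.Dict.empty else PySem.Dict.empty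
  TAF_stations.foldl (fun lines station =>
    let ms := metarIdx.getD station []
    let lines := if ms ≠ [] then lines ++ (ms ++ [""]) else lines
    lines ++ [tafIdx.getD station (station ++ " TAF not found"), ""]) []

-- ===== PRECONDITION & SPEC =====
def Spec_add_METARs_to_TAFs (TAFs : List String) (TAF_stations : List String) (METARs : List String) (max_metars : Int) (out : List String) : Prop := out = add_METARs_to_TAFs_alt TAFs TAF_stations METARs max_metars
instance (TAFs : List String) (TAF_stations : List String) (METARs : List String) (max_metars : Int) (out : List String) : Decidable (Spec_add_METARs_to_TAFs TAFs TAF_stations METARs max_metars out) := by unfold Spec_add_METARs_to_TAFs; infer_instance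

-- ===== CLAIM (what is proved, stated in full; the proofs are below) =====
def Claim_equal_add_METARs_to_TAFs : Prop := ∀ (TAFs : List String) (TAF_stations : List String) (METARs : List String) (max_metars : Int), Dom_add_METARs_to_TAFs TAFs TAF_stations METARs max_metars → Spec_add_METARs_to_TAFs TAFs TAF_stations METARs max_metars (add_METARs_to_TAFs TAFs TAF_stations METARs max_metars)

-- ===== LEMMAS AND PROOFS =====

-- what both sides compute per station from the METAR list
def pv_gather (s : String) (maxM : Int) (l : List String) : List String :=
  (l.filter (fun m => PySem.Str.slice m (some 0) (some 4) == s)).take (maxM).toNat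

theorem goA_eq_gather (s : String) (maxM : Int) :
    ∀ (l : List String) (lines : List String) (count : Int),
      all_METARs_from_station_go s maxM l lines count
        = lines ++ (l.filter (fun m => PySem.Str.slice m (some 0) (some 4) == s)).take (maxM - count).toNat := by
  intro l
  induction l with
  | nil => intro lines count; simp [all_METARs_from_station_go]
  | cons m rest ih =>
    intro lines count
    by_cases hge : count ≥ maxM
    · have : (maxM - count).toNat = 0 := by omega
      simp [all_METARs_from_station_go, hge, this]
    · by_cases hm : PySem.Str.slice m (some 0) (some 4) = s
      · have ht : (maxM - count).toNat = (maxM - (count + 1)).toNat + 1 := by omega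
        simp [all_METARs_from_station_go, hge, hm, ih, ht, List.take_succ_cons]
      · simp [all_METARs_from_station_go, hge, hm, ih]

theorem metar_index_getD (s : String) (maxM : Int) (hpos : 0 < maxM) :
    ∀ (l : List String) (d : PySem.Dict String (List String)),
      (pv_metar_index maxM l d).getD s []
        = d.getD s [] ++ (l.filter (fun m => PySem.Str.slice m (some 0) (some 4) == s)).take (maxM - ((d.getD s []).length : Int)).toNat := by
  intro l
  induction l with
  | nil => intro d; simp [pv_metar_index]
  | cons m rest ih =>
    intro d
    by_cases hk : PySem.Str.slice m (some 0) (some 4) = s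
    · subst hk
      cases hg : d.get? (PySem.Str.slice m (some 0) (some 4)) with
      | none =>
        have hd0 : d.getD (PySem.Str.slice m (some 0) (some 4)) [] = [] :=
          PySem.Dict.getD_of_get?_eq_none d _ hg
        have hfc : (m :: rest).filter (fun x => PySem.Str.slice x (some 0) (some 4) == PySem.Str.slice m (some 0) (some 4))
            = m :: rest.filter (fun x => PySem.Str.slice x (some 0) (some 4) == PySem.Str.slice m (some 0) (some 4)) :=
          List.filter_cons_of_pos (by simp)
        simp only [pv_metar_index, hg]
        rw [ih, PySem.Dict.getD_insert_self, hd0, hfc]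
        simp only [List.nil_append, List.singleton_append, List.length_singleton, List.length_nil,
          Nat.cast_one, Nat.cast_zero, sub_zero]
        rw [show maxM.toNat = (maxM - 1).toNat + 1 from by omega, List.take_succ_cons]
      | some lst =>
        have hd0 : d.getD (PySem.Str.slice m (some 0) (some 4)) [] = lst :=
          PySem.Dict.getD_of_get?_eq_some d _ hg
        by_cases hlt : (lst.length : Int) < maxM
        · have hfc : (m :: rest).filter (fun x => PySem.Str.slice x (some 0) (some 4) == PySem.Str.slice m (some 0) (some 4))
              = m :: rest.filter (fun x => PySem.Str.slice x (some 0) (some 4) == PySem.Str.slice m (some 0) (some 4)) :=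
            List.filter_cons_of_pos (by simp)
          simp only [pv_metar_index, hg, if_pos hlt]
          rw [ih, PySem.Dict.getD_insert_self, hd0, hfc]
          simp only [List.length_append, List.length_singleton, Nat.cast_add,
            Nat.cast_one, List.append_assoc, List.singleton_append]
          rw [show (maxM - ((lst.length : Nat) : Int)).toNat = (maxM - (((lst.length : Nat) : Int) + 1)).toNat + 1 from by omega,
            List.take_succ_cons]
        · have ht : (maxM - ((lst.length : Int))).toNat = 0 := by omega
          simp only [pv_metar_index, hg, if_neg hlt]
          rw [ih, hd0]
          simp [ht]
    · have hne : s ≠ PySem.Str.slice m (some 0) (some 4) := fun h => hk h.symm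
      simp only [pv_metar_index]
      cases hg : d.get? (PySem.Str.slice m (some 0) (some 4)) with
      | none =>
        rw [ih, PySem.Dict.getD_insert_of_ne _ _ _ hne]
        simp [hk]
      | some lst =>
        by_cases hlt : (lst.length : Int) < maxM
        · simp only [if_pos hlt]
          rw [ih, PySem.Dict.getD_insert_of_ne _ _ _ hne]
          simp [hk]
        · simp only [if_neg hlt]
          rw [ih]
          simp [hk]

theorem taf_index_getD (s : String) :
    ∀ (l : List String) (o : Int) (d : PySem.Dict String String),
      (pv_taf_index l o d).getD s (s ++ " TAF not found")
        = match d.get? s with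
          | some v => v
          | none => get_TAF_from_station_go s l o := by
  intro l
  induction l with
  | nil =>
    intro o d
    cases hg : d.get? s with
    | none =>
      simp only [pv_taf_index, get_TAF_from_station_go]
      exact PySem.Dict.getD_of_get?_eq_none d _ hg
    | some v =>
      simp only [pv_taf_index]
      exact PySem.Dict.getD_of_get?_eq_some d _ hg
  | cons t rest ih =>
    intro o d
    simp only [pv_taf_index, get_TAF_from_station_go]
    set o' := if PySem.Str.slice t (some 0) (some 4) = "TAF " then 4 else o with ho'
    set k := PySem.Str.slice t (some o') (some (o' + 4)) with hkd
    have hslice : PySem.Str.slice t (some (0 + o')) (some (4 + o')) = k := by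
      rw [hkd]; ring_nf
    cases hg : d.get? s with
    | some v =>
      by_cases hks : k = s
      · subst hks
        have : (d.get? k).isNone = false := by simp [hg]
        rw [this]
        simp only [Bool.false_eq_true, if_false]
        rw [ih, hg]
      · by_cases h2 : (d.get? k).isNone = true
        · rw [if_pos h2, ih, PySem.Dict.get?_insert_of_ne _ _ (fun h => hks h.symm), hg]
        · rw [if_neg h2, ih, hg]
    | none =>
      by_cases hks : k = s
      · subst hks
        have h2 : (d.get? k).isNone = true := by simp [hg]
        rw [if_pos h2, ih, PySem.Dict.get?_insert_self]
        rw [if_pos hslice]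
      · have hmatch : ¬ PySem.Str.slice t (some (0 + o')) (some (4 + o')) = s := by
          rw [hslice]; exact hks
        rw [if_neg hmatch]
        by_cases h2 : (d.get? k).isNone = true
        · rw [if_pos h2, ih, PySem.Dict.get?_insert_of_ne _ _ (fun h => hks h.symm), hg]
        · rw [if_neg h2, ih, hg]

theorem foldl_step_congr {α β : Type} (f g : α → β → α) (h : ∀ a b, f a b = g a b) :
    ∀ (l : List β) (a : α), l.foldl f a = l.foldl g a := by
  intro l
  induction l with
  | nil => intro a; rfl
  | cons x xs ih => intro a; simp only [List.foldl_cons, h, ih]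

-- ===== VERDICT (by name: the statement is the Claim_ definition above) =====
theorem add_METARs_to_TAFs_spec : Claim_equal_add_METARs_to_TAFs := by
  intro TAFs TAF_stations METARs max_metars _
  unfold Spec_add_METARs_to_TAFs add_METARs_to_TAFs add_METARs_to_TAFs_alt
  simp only []
  apply foldl_step_congr
  intro acc station
  -- the METAR block
  have hms : (if 0 < max_metars then pv_metar_index max_metars (PySem.List.sorted METARs (fun x => x) false) PySem.Dict.empty else PySem.Dict.empty).getD station []
      = pv_gather station max_metars (PySem.List.sorted METARs (fun x => x) false) := by
    by_cases hpos : 0 < max_metars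
    · rw [if_pos hpos, metar_index_getD station max_metars hpos]
      simp [pv_gather]
    · rw [if_neg hpos]
      have : max_metars.toNat = 0 := by omega
      simp [pv_gather, this]
  have hA : all_METARs_from_station (PySem.List.sorted METARs (fun x => x) false) station max_metars
      = (if pv_gather station max_metars (PySem.List.sorted METARs (fun x => x) false) ≠ [] then pv_gather station max_metars (PySem.List.sorted METARs (fun x => x) false) ++ [""] else pv_gather station max_metars (PySem.List.sorted METARs (fun x => x) false)) := by
    unfold all_METARs_from_station
    rw [goA_eq_gather]
    simp [pv_gather]
  have htaf : (pv_taf_index (PySem.List.sorted TAFs (fun x => x) false) 0 PySem.Dict.empty).getD station (station ++ " TAF not found")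
      = get_TAF_from_station (PySem.List.sorted TAFs (fun x => x) false) station := by
    rw [taf_index_getD]
    simp [get_TAF_from_station, PySem.Dict.get?_empty]
  rw [hA, hms, htaf]
  by_cases hnil : pv_gather station max_metars (PySem.List.sorted METARs (fun x => x) false) = []
  · simp [hnil]
  · simp [hnil]
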